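-- pv_equiv track=rewrite | github.com/pypi-data/pypi-mirror-398 | packages/tgit/tgit-0.27.0.tar.gz/tgit-0.27.0/tgit/version.py | extract_context_lines
-- ===== SOURCE A (Python) =====
-- def extract_context_lines(diff: list[str]) -> dict[int, str]:
--     print_lines: dict[int, str] = {}
--     for i, line in enumerate(diff):
--         if line.startswith(("+", "-")):
--             for j in range(i - 3, i + 3):
--                 if j >= 0 and j < len(diff):
--                     print_lines[j] = diff[j][0]
--     return print_lines
-- ===== SOURCE B (Python) =====
-- def extract_context_lines(diff: list[str]) -> dict[int, str]:
--     print_lines: dict[int, str] = {}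
--     for j in range(len(diff)):
--         for k in range(j - 2, j + 4):
--             if 0 <= k < len(diff) and diff[k].startswith(("+", "-")):
--                 print_lines[j] = diff[j][0]
--                 break
--     return print_lines
-- ===== Notes on version B (the rewrite author's own statement) =====
-- stated objective: alternative
-- what changed: B iterates over output positions and scans each position's fixed neighbourhood [j-2, j+3] for a changed line (breaking at the first hit), instead of A's iteration over changed lines expanding a window [i-3, i+2] around each and overwriting dict entries.
import Mathlib
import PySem

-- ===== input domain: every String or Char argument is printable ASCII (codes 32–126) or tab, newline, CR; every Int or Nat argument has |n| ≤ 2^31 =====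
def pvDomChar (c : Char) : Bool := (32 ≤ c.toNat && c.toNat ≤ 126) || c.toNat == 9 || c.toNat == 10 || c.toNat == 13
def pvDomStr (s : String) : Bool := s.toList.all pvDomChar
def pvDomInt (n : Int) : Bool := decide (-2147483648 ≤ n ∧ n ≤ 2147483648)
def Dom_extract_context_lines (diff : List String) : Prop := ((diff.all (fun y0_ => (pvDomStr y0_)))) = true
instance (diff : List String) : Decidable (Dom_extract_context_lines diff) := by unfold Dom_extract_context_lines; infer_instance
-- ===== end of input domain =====

-- B flips the loop roles: instead of expanding a window around every changed line, it
-- scans, for each output position, its fixed neighbourhood for a changed line (alternative decomposition, same asymptotic cost).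

-- ===== PORT A =====
-- line.startswith(("+", "-"))
def pvIsChange (s : String) : Bool :=
  PySem.Str.startswith s "+" || PySem.Str.startswith s "-"

-- diff[j][0] as a one-character string; "" is only reached where Python raises IndexError (excluded by Pre_)
def pvFirst (s : String) : String :=
  match PySem.Str.pyGet? s 0 with
  | some c => String.ofList [c]
  | none => ""

def extract_context_lines (diff : List String) : List (Int × String) :=
  ((PySem.List.enumerate diff 0).foldl
    (fun d p =>
      if pvIsChange p.2 then
        (PySem.List.pyRange (p.1 - 3) (p.1 + 3) 1).foldl
          (fun d j =>
            if 0 ≤ j ∧ j < PySem.List.len diff then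
              d.insert j (pvFirst (PySem.List.pyGetD diff j ""))
            else d) d
      else d)
    (PySem.Dict.empty : PySem.Dict Int String)).items

-- ===== PORT B =====
def extract_context_lines_alt (diff : List String) : List (Int × String) :=
  ((PySem.List.pyRange 0 (PySem.List.len diff) 1).foldl
    (fun d j =>
      if (PySem.List.pyRange (j - 2) (j + 4) 1).any
           (fun k => decide (0 ≤ k ∧ k < PySem.List.len diff) &&
                     pvIsChange (PySem.List.pyGetD diff k "")) then
        d.insert j (pvFirst (PySem.List.pyGetD diff j ""))
      else d)
    (PySem.Dict.empty : PySem.Dict Int String)).items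

-- ===== PRECONDITION & SPEC =====
-- Pre_ excludes exactly the inputs on which Python A raises IndexError: an empty line within
-- the marked window [k-3, k+2] of some changed line k (diff[j][0] on an empty diff[j]).
def Pre_extract_context_lines (diff : List String) : Prop :=
  ∀ j : Nat, j < diff.length → (diff.getD j "").toList = [] →
    ∀ k : Nat, k < diff.length →
      ((j : Int) - 2 ≤ (k : Int) ∧ (k : Int) ≤ (j : Int) + 3) →
        ¬ ((diff.getD k "").toList.head? = some '+' ∨ (diff.getD k "").toList.head? = some '-')
instance (diff : List String) : Decidable (Pre_extract_context_lines diff) := by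
  unfold Pre_extract_context_lines; exact Nat.decidableBallLT _ _

def pvWitness_extract_context_lines : List String := ["ctx", "+a", "-b", " c"]

def Spec_extract_context_lines (diff : List String) (out : List (Int × String)) : Prop := out = extract_context_lines_alt diff
instance (diff : List String) (out : List (Int × String)) : Decidable (Spec_extract_context_lines diff out) := by unfold Spec_extract_context_lines; infer_instance

-- ===== CLAIM (what is proved, stated in full; the proofs are below) =====
def Claim_equal_extract_context_lines : Prop := ∀ (diff : List String), Dom_extract_context_lines diff → Pre_extract_context_lines diff → Spec_extract_context_lines diff (extract_context_lines diff)

-- ===== LEMMAS AND PROOFS =====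

-- whether line k of diff is a change line
def pvChgX (diff : List String) (k : Nat) : Bool := pvIsChange (diff.getD k "")

-- the value stored for output position j
def pvVal (diff : List String) (j : Nat) : String := pvFirst (diff.getD j "")

-- the association list both loops build: the kept positions of range(len(diff)), in ascending order
def pvShape (diff : List String) (P : Nat → Bool) : List (Int × String) :=
  (List.range diff.length).filterMap
    (fun j => if P j then some (((j : Nat) : Int), pvVal diff j) else none)

-- change at line k marks position j  (j ∈ [k-3, k+2], i.e. k ∈ [j-2, j+3])
def pvWin (j k : Nat) : Bool := decide ((j : Int) - 2 ≤ (k : Int) ∧ (k : Int) ≤ (j : Int) + 3)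

-- positions marked by the change lines among the first m lines of diff
def pvMarkUp (diff : List String) (m : Nat) (j : Nat) : Bool :=
  (List.range m).any (fun k => pvWin j k && pvChgX diff k)

theorem pvShape_congr (diff : List String) (P Q : Nat → Bool)
    (h : ∀ j, j < diff.length → P j = Q j) : pvShape diff P = pvShape diff Q := by
  unfold pvShape
  exact List.filterMap_congr (fun j hj => by rw [h j (List.mem_range.mp hj)])

theorem pvContains_shape (diff : List String) (P : Nat → Bool) (d : PySem.Dict Int String)
    (hd : d.items = pvShape diff P) (j : Nat) (hj : j < diff.length) :
    d.contains ((j : Nat) : Int) = P j := by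
  rw [PySem.Dict.contains_eq_decide_mem_keys]
  have hk : d.keys = (pvShape diff P).map (·.1) := by rw [← hd]; rfl
  rw [hk]
  unfold pvShape
  cases hP : P j with
  | false =>
    apply decide_eq_false
    simp only [List.mem_map, List.mem_filterMap, List.mem_range]
    rintro ⟨p, ⟨j', hj', hopt⟩, hfst⟩
    by_cases h : P j' = true
    · rw [if_pos h] at hopt
      obtain rfl := Option.some.inj hopt
      have : j' = j := by simpa using hfst
      subst this; rw [h] at hP; exact Bool.noConfusion hP
    · rw [if_neg h] at hopt; simp at hopt
  | true =>
    apply decide_eq_true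
    simp only [List.mem_map, List.mem_filterMap, List.mem_range]
    exact ⟨((j:Int), pvVal diff j), ⟨j, hj, by simp [hP]⟩, rfl⟩

theorem pvItems_insert_shape (diff : List String) (P : Nat → Bool) (d : PySem.Dict Int String)
    (hd : d.items = pvShape diff P) (j : Nat) (hj : j < diff.length)
    (hfr : P j = true ∨ ∀ j', j' < diff.length → P j' = true → j' < j) :
    (d.insert ((j : Nat) : Int) (pvVal diff j)).items
      = pvShape diff (fun j' => P j' || j' == j) := by
  cases hP : P j with
  | true =>
    have hc : d.contains ((j : Nat) : Int) = true := by
      rw [pvContains_shape diff P d hd j hj, hP]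
    rw [PySem.Dict.items_insert_of_contains d _ hc, hd]
    unfold pvShape
    rw [List.map_filterMap]
    apply List.filterMap_congr
    intro j' hj'
    by_cases h : P j' = true
    · rw [if_pos h, if_pos (by simp only []; rw [h]; simp)]
      simp only [Option.map_some]
      by_cases hje : j' = j
      · subst hje; simp
      · have : ((((j' : Nat) : Int), pvVal diff j').1 == ((j : Nat) : Int)) = false := by
          simp [hje]
        simp only [this, Bool.false_eq_true, if_false]
    · have hje : j' ≠ j := fun he => h (he ▸ hP)
      rw [if_neg h, if_neg (by simp [h, hje])]
      rfl
  | false =>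
    have hc : d.contains ((j : Nat) : Int) = false := by
      rw [pvContains_shape diff P d hd j hj, hP]
    rw [PySem.Dict.items_insert_of_not_contains d _ hc, hd]
    have hfr' : ∀ j', j' < diff.length → P j' = true → j' < j := by
      rcases hfr with h | h
      · rw [hP] at h; exact Bool.noConfusion h
      · exact h
    unfold pvShape
    have hsplit : List.range diff.length
        = List.range j ++ j :: List.range' (j + 1) (diff.length - j - 1) := by
      rw [List.range_eq_range']
      have h1 : diff.length = j + (diff.length - j) := by omega
      rw [h1, ← List.range'_append (s := 0) (m := j) (n := diff.length - j) (step := 1)]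
      congr 1
      · rw [← List.range_eq_range']
      · have h2 : diff.length - j = (diff.length - j - 1) + 1 := by omega
        rw [h2, List.range'_succ]
        simp
    rw [hsplit]
    simp only [List.filterMap_append, List.filterMap_cons]
    have hmid1 : (if P j = true then some (((j : Nat) : Int), pvVal diff j) else none) = none := by
      rw [if_neg (by rw [hP]; exact fun h => Bool.noConfusion h)]
    have hmid2 : (if (P j || (j == j)) = true then some (((j : Nat) : Int), pvVal diff j) else none)
        = some (((j : Nat) : Int), pvVal diff j) := by simp
    rw [hmid1, hmid2]
    have htail1 : (List.range' (j + 1) (diff.length - j - 1)).filterMap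
        (fun j' => if P j' = true then some (((j' : Nat) : Int), pvVal diff j') else none) = [] := by
      apply List.filterMap_eq_nil_iff.mpr
      intro j' hj'
      have hb := List.mem_range'_1.mp hj'
      rw [if_neg]
      intro hc2
      exact absurd (hfr' j' (by omega) hc2) (by omega)
    have htail2 : (List.range' (j + 1) (diff.length - j - 1)).filterMap
        (fun j' => if (P j' || (j' == j)) = true then some (((j' : Nat) : Int), pvVal diff j') else none) = [] := by
      apply List.filterMap_eq_nil_iff.mpr
      intro j' hj'
      have hb := List.mem_range'_1.mp hj'
      rw [if_neg]
      simp only [Bool.or_eq_true, not_or]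
      constructor
      · intro hc2
        exact absurd (hfr' j' (by omega) hc2) (by omega)
      · simp; omega
    rw [htail1, htail2]
    have hhead : (List.range j).filterMap
        (fun j' => if P j' = true then some (((j' : Nat) : Int), pvVal diff j') else none)
        = (List.range j).filterMap
        (fun j' => if (P j' || (j' == j)) = true then some (((j' : Nat) : Int), pvVal diff j') else none) := by
      apply List.filterMap_congr
      intro j' hj'
      have : j' ≠ j := by have := List.mem_range.mp hj'; omega
      simp [this]
    rw [hhead]
    simp

theorem pvA_inner (diff : List String) :
    ∀ (t : Nat) (a : Int) (P : Nat → Bool) (d : PySem.Dict Int String),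
      d.items = pvShape diff P →
      (∀ j2 : Nat, a ≤ (j2 : Int) → (j2 : Int) < a + t → j2 < diff.length → P j2 = false →
        ∀ j', j' < diff.length → P j' = true → j' < j2) →
      ((PySem.List.pyRange a (a + t) 1).foldl
        (fun d j =>
          if 0 ≤ j ∧ j < PySem.List.len diff then
            d.insert j (pvFirst (PySem.List.pyGetD diff j ""))
          else d) d).items
        = pvShape diff (fun j => P j || decide (a ≤ (j : Int) ∧ (j : Int) < a + t)) := by
  intro t
  induction t with
  | zero =>
    intro a P d hd _
    rw [show a + ((0 : Nat) : Int) = a by simp, PySem.List.pyRange_one_eq_nil (le_refl a)]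
    simp only [List.foldl_nil]
    rw [hd]
    apply pvShape_congr
    intro j hj
    simp
  | succ t ih =>
    intro a P d hd H
    have hca : a < a + ((t + 1 : Nat) : Int) := by push_cast; omega
    rw [PySem.List.pyRange_one_cons hca]
    simp only [List.foldl_cons]
    have harange : a + ((t + 1 : Nat) : Int) = (a + 1) + ((t : Nat) : Int) := by push_cast; ring
    by_cases hg : 0 ≤ a ∧ a < PySem.List.len diff
    · rw [if_pos hg]
      obtain ⟨h0, hlt⟩ := hg
      have hlen : a < (diff.length : Int) := by simpa using hlt
      have hac : a = ((a.toNat : Nat) : Int) := by omega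
      have hjn : a.toNat < diff.length := by omega
      have hfr2 : P a.toNat = true ∨
          ∀ j', j' < diff.length → P j' = true → j' < a.toNat := by
        cases hPj : P a.toNat with
        | true => left; rfl
        | false =>
          right
          exact H a.toNat (by omega) (by push_cast; omega) hjn hPj
      have hins : (d.insert a (pvFirst (PySem.List.pyGetD diff a ""))).items
          = pvShape diff (fun j' => P j' || (j' == a.toNat)) := by
        rw [hac, show PySem.List.pyGetD diff ((a.toNat : Nat) : Int) "" = diff.getD a.toNat "" from by rw [PySem.List.pyGetD_natCast]]
        exact pvItems_insert_shape diff P d hd a.toNat hjn hfr2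
      have H' : ∀ j2 : Nat, (a + 1) ≤ (j2 : Int) → (j2 : Int) < (a + 1) + t → j2 < diff.length →
          (P j2 || (j2 == a.toNat)) = false →
          ∀ j', j' < diff.length → (P j' || (j' == a.toNat)) = true → j' < j2 := by
        intro j2 h1 h2 h3 h4 j' h5 h6
        simp only [Bool.or_eq_false_iff, beq_eq_false_iff_ne, ne_eq] at h4
        simp only [Bool.or_eq_true, beq_iff_eq] at h6
        rcases h6 with h6 | h6
        · exact H j2 (by omega) (by push_cast at h2 ⊢; omega) h3 h4.1 j' h5 h6
        · omega
      rw [harange, ih (a + 1) _ _ hins H']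
      apply pvShape_congr
      intro j2 hj2
      cases hP2 : P j2
      · simp only [Bool.false_or]
        rw [Bool.eq_iff_iff]
        simp only [Bool.or_eq_true, beq_iff_eq, decide_eq_true_eq]
        omega
      · simp only [Bool.true_or]
    · rw [if_neg hg]
      have hlen : ¬ (0 ≤ a ∧ a < (diff.length : Int)) := by simpa using hg
      have H' : ∀ j2 : Nat, (a + 1) ≤ (j2 : Int) → (j2 : Int) < (a + 1) + t → j2 < diff.length →
          P j2 = false → ∀ j', j' < diff.length → P j' = true → j' < j2 := by
        intro j2 h1 h2
        exact H j2 (by omega) (by push_cast at h2 ⊢; omega)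
      rw [harange, ih (a + 1) P d hd H']
      apply pvShape_congr
      intro j2 hj2
      cases hP2 : P j2
      · simp only [Bool.false_or]
        rw [Bool.eq_iff_iff]
        simp only [decide_eq_true_eq]
        omega
      · simp only [Bool.true_or]

theorem pvMarkUp_succ (diff : List String) (m j : Nat) :
    pvMarkUp diff (m + 1) j = (pvMarkUp diff m j || (pvWin j m && pvChgX diff m)) := by
  unfold pvMarkUp
  rw [List.range_succ, List.any_append]
  simp

theorem pvA_outer (diff : List String) :
    ∀ m : Nat, m ≤ diff.length →
      ((PySem.List.pyRange 0 ((m : Nat) : Int) 1).foldl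
        (fun d j =>
          if pvIsChange (PySem.List.pyGetD diff j "") then
            (PySem.List.pyRange (j - 3) (j + 3) 1).foldl
              (fun d j =>
                if 0 ≤ j ∧ j < PySem.List.len diff then
                  d.insert j (pvFirst (PySem.List.pyGetD diff j ""))
                else d) d
          else d)
        (PySem.Dict.empty : PySem.Dict Int String)).items
        = pvShape diff (pvMarkUp diff m) := by
  intro m
  induction m with
  | zero =>
    intro _
    rw [show ((0 : Nat) : Int) = 0 by simp, PySem.List.pyRange_one_eq_nil (le_refl 0)]
    simp [pvShape, pvMarkUp, PySem.Dict.empty]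
  | succ m ih =>
    intro hm
    rw [show ((m + 1 : Nat) : Int) = ((m : Nat) : Int) + 1 by push_cast; ring,
        PySem.List.pyRange_one_succ_right (by positivity)]
    rw [List.foldl_append]
    simp only [List.foldl_cons, List.foldl_nil]
    have hget : PySem.List.pyGetD diff ((m : Nat) : Int) "" = diff.getD m "" := by
      rw [PySem.List.pyGetD_natCast]
    rw [hget]
    cases hc : pvChgX diff m with
    | false =>
      rw [if_neg (by unfold pvChgX at hc; rw [hc]; exact fun h => Bool.noConfusion h)]
      rw [ih (by omega)]
      apply pvShape_congr
      intro j hj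
      rw [pvMarkUp_succ, hc]
      simp
    | true =>
      rw [if_pos (by unfold pvChgX at hc; rw [hc])]
      have h6 : ((m : Nat) : Int) + 3 = (((m : Nat) : Int) - 3) + ((6 : Nat) : Int) := by
        push_cast; ring
      rw [h6, pvA_inner diff 6 (((m : Nat) : Int) - 3) (pvMarkUp diff m) _ (ih (by omega)) ?hfr]
      case hfr =>
        intro j2 hl hr hjn hmk j' hj' hmk'
        unfold pvMarkUp at hmk hmk'
        rw [List.any_eq_true] at hmk'
        obtain ⟨k, hkmem, hk⟩ := hmk'
        have hkm := List.mem_range.mp hkmem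
        rw [Bool.and_eq_true] at hk
        have hwin := of_decide_eq_true hk.1
        by_contra hcon
        have hge : j2 ≤ j' := by omega
        have : (List.range m).any (fun k => pvWin j2 k && pvChgX diff k) = true := by
          rw [List.any_eq_true]
          refine ⟨k, hkmem, ?_⟩
          rw [Bool.and_eq_true]
          refine ⟨decide_eq_true ?_, hk.2⟩
          push_cast at hl hr ⊢
          omega
        rw [this] at hmk
        exact Bool.noConfusion hmk
      apply pvShape_congr
      intro j hj
      rw [pvMarkUp_succ, hc, Bool.and_true]
      cases hP : pvMarkUp diff m j
      · simp only [Bool.false_or]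
        rw [Bool.eq_iff_iff]
        unfold pvWin
        simp only [decide_eq_true_eq]
        push_cast
        omega
      · simp only [Bool.true_or]

theorem pvA_items (diff : List String) :
    extract_context_lines diff = pvShape diff (pvMarkUp diff diff.length) := by
  unfold extract_context_lines
  rw [PySem.List.enumerate_eq_map_pyRange (d := ""), List.foldl_map]
  have h := pvA_outer diff diff.length (le_refl _)
  simp only [PySem.List.len_eq] at h ⊢
  exact h

theorem pvB_cond (diff : List String) (j : Nat) :
    ((PySem.List.pyRange ((j : Int) - 2) ((j : Int) + 4) 1).any
      (fun k => decide (0 ≤ k ∧ k < PySem.List.len diff) &&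
                pvIsChange (PySem.List.pyGetD diff k "")))
      = pvMarkUp diff diff.length j := by
  rw [Bool.eq_iff_iff]
  unfold pvMarkUp
  rw [List.any_eq_true, List.any_eq_true]
  constructor
  · rintro ⟨k, hkmem, hk⟩
    have hkb := PySem.List.mem_pyRange_one.mp hkmem
    rw [Bool.and_eq_true, decide_eq_true_eq] at hk
    obtain ⟨⟨hk0, hklen⟩, hchg⟩ := hk
    have hklen' : k < (diff.length : Int) := by simpa using hklen
    refine ⟨k.toNat, List.mem_range.mpr (by omega), ?_⟩
    rw [Bool.and_eq_true]
    constructor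
    · exact decide_eq_true (by omega)
    · unfold pvChgX
      have : PySem.List.pyGetD diff k "" = diff.getD k.toNat "" := by
        rw [show k = ((k.toNat : Nat) : Int) by omega, PySem.List.pyGetD_natCast]
        simp
        rw [max_eq_left hk0]
      rwa [this] at hchg
  · rintro ⟨k, hkmem, hk⟩
    have hkn := List.mem_range.mp hkmem
    rw [Bool.and_eq_true] at hk
    have hwin := of_decide_eq_true hk.1
    refine ⟨(k : Int), PySem.List.mem_pyRange_one.mpr (by omega), ?_⟩
    rw [Bool.and_eq_true, decide_eq_true_eq]
    refine ⟨⟨by omega, by simp; omega⟩, ?_⟩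
    rw [PySem.List.pyGetD_natCast]
    exact hk.2

theorem pvB_outer (diff : List String) :
    ∀ m : Nat, m ≤ diff.length →
      ((PySem.List.pyRange 0 ((m : Nat) : Int) 1).foldl
        (fun d j =>
          if (PySem.List.pyRange (j - 2) (j + 4) 1).any
               (fun k => decide (0 ≤ k ∧ k < PySem.List.len diff) &&
                         pvIsChange (PySem.List.pyGetD diff k "")) then
            d.insert j (pvFirst (PySem.List.pyGetD diff j ""))
          else d)
        (PySem.Dict.empty : PySem.Dict Int String)).items
        = pvShape diff (fun j => decide (j < m) && pvMarkUp diff diff.length j) := by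
  intro m
  induction m with
  | zero =>
    intro _
    rw [show ((0 : Nat) : Int) = 0 by simp, PySem.List.pyRange_one_eq_nil (le_refl 0)]
    simp [pvShape, PySem.Dict.empty]
  | succ m ih =>
    intro hm
    rw [show ((m + 1 : Nat) : Int) = ((m : Nat) : Int) + 1 by push_cast; ring,
        PySem.List.pyRange_one_succ_right (by positivity)]
    rw [List.foldl_append]
    simp only [List.foldl_cons, List.foldl_nil]
    rw [pvB_cond diff m]
    cases hc : pvMarkUp diff diff.length m with
    | false =>
      rw [if_neg (fun h => Bool.noConfusion h)]
      rw [ih (by omega)]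
      apply pvShape_congr
      intro j hj
      by_cases hje : j = m
      · subst hje; rw [hc]; simp
      · have : (decide (j < m)) = (decide (j < m + 1)) := by
          rw [Bool.eq_iff_iff]; simp only [decide_eq_true_eq]; omega
        rw [this]
    | true =>
      rw [if_pos rfl]
      have hval : PySem.List.pyGetD diff ((m : Nat) : Int) "" = diff.getD m "" := by
        rw [PySem.List.pyGetD_natCast]
      rw [hval, show pvFirst (diff.getD m "") = pvVal diff m from rfl]
      rw [pvItems_insert_shape diff _ _ (ih (by omega)) m (by omega)
            (Or.inr (fun j' _ h => by
              rw [Bool.and_eq_true, decide_eq_true_eq] at h; exact h.1))]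
      apply pvShape_congr
      intro j hj
      by_cases hje : j = m
      · subst hje; rw [hc]; simp
      · have h1 : (j == m) = false := by simp [hje]
        rw [h1, Bool.or_false]
        have : (decide (j < m)) = (decide (j < m + 1)) := by
          rw [Bool.eq_iff_iff]; simp only [decide_eq_true_eq]; omega
        rw [this]

theorem pvB_items (diff : List String) :
    extract_context_lines_alt diff = pvShape diff (pvMarkUp diff diff.length) := by
  unfold extract_context_lines_alt
  have h := pvB_outer diff diff.length (le_refl _)
  simp only [PySem.List.len_eq] at h ⊢
  rw [h]
  apply pvShape_congr
  intro j hj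
  rw [decide_eq_true (by omega : j < diff.length), Bool.true_and]

-- ===== VERDICT (by name: the statement is the Claim_ definition above) =====
theorem extract_context_lines_spec : Claim_equal_extract_context_lines := by
  intro diff _ _
  unfold Spec_extract_context_lines
  rw [pvA_items, pvB_items]
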